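-- pv_equiv track=rewrite | github.com/thomas-vinet/Mines-TD-PSD | TD1/scrabble.py | mot_possible_joker
-- ===== SOURCE A (Python) =====
-- def mot_possible_joker(tirage, mot):
--     '''Renvoie si on peut écrire le mot en prenant en compte l'utilisation d'un joker, renvoie aussi la lettre remplacée'''
--     cp = tirage[::]#Une copie du tirage
--     assert cp.count("?") <= 1#Un seul joker au plus
--     jokerAvailable = "?" in cp
--     jokerReplace = ""
--     for lettre in mot:
--         if lettre in cp:
--             cp.remove(lettre)
--         elif jokerAvailable:
--             jokerAvailable = False
--             jokerReplace = lettre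
--         else:
--             return False, ""
--     return True, jokerReplace
-- ===== SOURCE B (Python) =====
-- def mot_possible_joker(tirage, mot):
--     '''Renvoie si on peut écrire le mot en prenant en compte l'utilisation d'un joker, renvoie aussi la lettre remplacée'''
--     assert tirage.count("?") <= 1
--     need = {}
--     for lettre in mot:
--         need[lettre] = need.get(lettre, 0) + 1
--     have = {}
--     for piece in tirage:
--         have[piece] = have.get(piece, 0) + 1
--     total = 0
--     missing = ""
--     for lettre, n in need.items():
--         d = n - have.get(lettre, 0)
--         if d > 0:
--             total += d
--             missing = lettre
--     if total == 0:
--         return True, ""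
--     if total == 1 and "?" in tirage:
--         return True, missing
--     return False, ""
-- ===== Notes on version B (the rewrite author's own statement) =====
-- stated objective: faster
-- what changed: Replaces A's sequential per-letter simulation (mutable rack copy scanned and shrunk per letter, plus a jokerAvailable/jokerReplace state machine with early return) by two hash-map counting passes (letter counts of the word and of the rack) and one classification pass over the shortfall: total 0 -> (True,''), total 1 with a joker on the rack -> (True, missing letter), otherwise (False,'').
import Mathlib
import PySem

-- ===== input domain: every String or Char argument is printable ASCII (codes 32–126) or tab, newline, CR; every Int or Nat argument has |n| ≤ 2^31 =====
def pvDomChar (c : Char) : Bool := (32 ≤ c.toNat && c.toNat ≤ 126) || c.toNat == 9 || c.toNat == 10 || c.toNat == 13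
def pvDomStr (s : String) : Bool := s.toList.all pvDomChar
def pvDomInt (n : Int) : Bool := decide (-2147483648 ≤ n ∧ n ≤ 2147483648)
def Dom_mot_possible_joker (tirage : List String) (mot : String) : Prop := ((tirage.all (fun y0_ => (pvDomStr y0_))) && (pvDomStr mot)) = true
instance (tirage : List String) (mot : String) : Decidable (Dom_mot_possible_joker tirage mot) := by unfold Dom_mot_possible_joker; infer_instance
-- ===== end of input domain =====

-- B replaces A's per-letter joker state machine by a shortfall table (multiset difference) built first
-- and then classified in one step (objective: simpler). A mutates only its private copy of `tirage`.

-- ===== PORT A =====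
-- the for-loop over `mot` with state (cp, jokerAvailable, jokerReplace);
-- `cp.remove(lettre)` after the membership check is List.erase (first occurrence)
def pvAuxA : List Char → List String → Bool → String → Bool × String
  | [], _, _, jokerReplace => (true, jokerReplace)
  | lettre :: rest, cp, jokerAvailable, jokerReplace =>
    if cp.contains (String.singleton lettre) then
      pvAuxA rest (cp.erase (String.singleton lettre)) jokerAvailable jokerReplace
    else if jokerAvailable then
      pvAuxA rest cp false (String.singleton lettre)
    else (false, "")

def mot_possible_joker (tirage : List String) (mot : String) : Bool × String :=
  let cp := tirage   -- tirage[::]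
  pvAuxA mot.toList cp (cp.contains "?") ""

-- ===== PORT B =====
-- the three loops of Source B: the two counter dicts, then the classification pass over need.items()
def pvNeed (mot : String) : PySem.Dict Char Int :=
  mot.toList.foldl (fun d lettre => d.insert lettre (d.getD lettre 0 + 1)) PySem.Dict.empty

def pvHave (tirage : List String) : PySem.Dict String Int :=
  tirage.foldl (fun d piece => d.insert piece (d.getD piece 0 + 1)) PySem.Dict.empty

-- the `for lettre, n in need.items():` loop with state (total, missing)
def pvClassify (tirage : List String) (mot : String) : Int × String :=
  (pvNeed mot).items.foldl
    (fun acc p =>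
      let d := p.2 - (pvHave tirage).getD (String.singleton p.1) 0
      if d > 0 then (acc.1 + d, String.singleton p.1) else acc)
    (0, "")

def mot_possible_joker_alt (tirage : List String) (mot : String) : Bool × String :=
  let res := pvClassify tirage mot
  if res.1 = 0 then (true, "")
  else if res.1 = 1 ∧ tirage.contains "?" then (true, res.2)
  else (false, "")

-- ===== PRECONDITION & SPEC =====
-- A's `assert cp.count("?") <= 1` raises AssertionError on racks with two or more jokers; exactly those are excluded.
def Pre_mot_possible_joker (tirage : List String) (mot : String) : Prop :=
  PySem.List.count tirage "?" ≤ 1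
instance (tirage : List String) (mot : String) : Decidable (Pre_mot_possible_joker tirage mot) := by unfold Pre_mot_possible_joker; infer_instance

def pvWitness_mot_possible_joker : List String × String := (["a", "?", "b"], "abc")

def Spec_mot_possible_joker (tirage : List String) (mot : String) (out : Bool × String) : Prop := out = mot_possible_joker_alt tirage mot
instance (tirage : List String) (mot : String) (out : Bool × String) : Decidable (Spec_mot_possible_joker tirage mot out) := by unfold Spec_mot_possible_joker; infer_instance

-- ===== CLAIM (what is proved, stated in full; the proofs are below) =====
def Claim_equal_mot_possible_joker : Prop := ∀ (tirage : List String) (mot : String), Dom_mot_possible_joker tirage mot → Pre_mot_possible_joker tirage mot → Spec_mot_possible_joker tirage mot (mot_possible_joker tirage mot)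

-- ===== LEMMAS AND PROOFS =====

theorem pv_singleton_inj {a b : Char} (h : String.singleton a = String.singleton b) : a = b := by
  simpa using congrArg String.toList h

-- the letters of `mot` (in order) that the evolving rack copy fails to supply
def pvMisses : List Char → List String → List Char
  | [], _ => []
  | lettre :: rest, cp =>
    if cp.contains (String.singleton lettre) then pvMisses rest (cp.erase (String.singleton lettre))
    else lettre :: pvMisses rest cp

theorem pvAuxA_false (rest : List Char) : ∀ (cp : List String) (jr : String),
    pvAuxA rest cp false jr = if pvMisses rest cp = [] then (true, jr) else (false, "") := by
  induction rest with
  | nil => intro cp jr; simp [pvAuxA, pvMisses]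
  | cons l rest ih =>
    intro cp jr
    simp only [pvAuxA, pvMisses]
    by_cases h : String.singleton l ∈ cp
    · simp [h, ih]
    · simp [h]

theorem pvAuxA_true (rest : List Char) : ∀ (cp : List String),
    pvAuxA rest cp true "" =
      match pvMisses rest cp with
      | [] => (true, "")
      | [l] => (true, String.singleton l)
      | _ :: _ :: _ => (false, "") := by
  induction rest with
  | nil => intro cp; simp [pvAuxA, pvMisses]
  | cons l rest ih =>
    intro cp
    simp only [pvAuxA, pvMisses]
    by_cases h : String.singleton l ∈ cp
    · simp [h, ih]
    · have hc : ¬ cp.contains (String.singleton l) = true := by simpa using h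
      simp only [hc]
      rw [pvAuxA_false]
      rcases hx : pvMisses rest cp with _ | ⟨a, t⟩ <;> simp [hx]

theorem pvMisses_count (rest : List Char) : ∀ (cp : List String) (l : Char),
    (pvMisses rest cp).count l = rest.count l - cp.count (String.singleton l) := by
  induction rest with
  | nil => intro cp l; simp [pvMisses]
  | cons x rest ih =>
    intro cp l
    simp only [pvMisses]
    by_cases h : String.singleton x ∈ cp
    · rw [if_pos (by simpa using h)]
      have hcp : 1 ≤ cp.count (String.singleton x) := List.one_le_count_iff.mpr h
      by_cases hl : l = x
      · subst hl
        rw [ih, List.count_erase_self]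
        simp only [List.count_cons_self]
        omega
      · have hs : String.singleton l ≠ String.singleton x := fun hc => hl (pv_singleton_inj hc)
        have hxl : ¬ x = l := fun hc => hl hc.symm
        rw [ih, List.count_erase_of_ne hs]
        simp [hxl]
    · rw [if_neg (by simpa using h)]
      have hcp : cp.count (String.singleton x) = 0 := List.count_eq_zero.mpr h
      by_cases hl : l = x
      · subst hl
        simp only [List.count_cons_self, ih, hcp]
        omega
      · have hxl : ¬ x = l := fun hc => hl hc.symm
        simp [hxl, ih]

-- B's classification fold over any key list: the first component accumulates the total shortfall,
-- which is the number of misses of A's loop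
theorem pvFold_total (chars : List Char) (tirage : List String) (K : List Char) :
    ∀ acc : Int × String,
    (K.foldl (fun acc k =>
        if ((chars.count k : Int) - (tirage.count (String.singleton k) : Int)) > 0 then
          (acc.1 + ((chars.count k : Int) - (tirage.count (String.singleton k) : Int)), String.singleton k)
        else acc) acc).1
      = acc.1 + (K.map (fun k => ((pvMisses chars tirage).count k : Int))).sum := by
  induction K with
  | nil => intro acc; simp
  | cons k K ih =>
    intro acc
    simp only [List.foldl_cons, List.map_cons, List.sum_cons]
    have hc := pvMisses_count chars tirage k
    by_cases h : ((chars.count k : Int) - (tirage.count (String.singleton k) : Int)) > 0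
    · rw [if_pos h, ih]
      omega
    · rw [if_neg h, ih]
      omega

theorem pvFold_missing_keep (chars : List Char) (tirage : List String) (k0 : Char) (K : List Char)
    (hz : ∀ k ∈ K, k ≠ k0 → (pvMisses chars tirage).count k = 0) :
    ∀ acc : Int × String, acc.2 = String.singleton k0 →
    (K.foldl (fun acc k =>
        if ((chars.count k : Int) - (tirage.count (String.singleton k) : Int)) > 0 then
          (acc.1 + ((chars.count k : Int) - (tirage.count (String.singleton k) : Int)), String.singleton k)
        else acc) acc).2 = String.singleton k0 := by
  induction K with
  | nil => intro acc h; simpa using h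
  | cons k K ih =>
    intro acc hacc
    simp only [List.foldl_cons]
    have hz' : ∀ k ∈ K, k ≠ k0 → (pvMisses chars tirage).count k = 0 :=
      fun k hk => hz k (List.mem_cons_of_mem _ hk)
    by_cases h : ((chars.count k : Int) - (tirage.count (String.singleton k) : Int)) > 0
    · have hk0 : k = k0 := by
        by_contra hne
        have h0 := hz k (List.mem_cons_self ..) hne
        have hc := pvMisses_count chars tirage k
        omega
      rw [if_pos h]
      exact ih hz' _ (by rw [hk0])
    · rw [if_neg h]
      exact ih hz' _ hacc

-- when exactly one key has a positive shortfall, the fold's second component is that letter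
theorem pvFold_missing (chars : List Char) (tirage : List String) (k0 : Char) (K : List Char)
    (hk0 : k0 ∈ K) (hpos : 0 < (pvMisses chars tirage).count k0)
    (hz : ∀ k ∈ K, k ≠ k0 → (pvMisses chars tirage).count k = 0) :
    ∀ acc : Int × String,
    (K.foldl (fun acc k =>
        if ((chars.count k : Int) - (tirage.count (String.singleton k) : Int)) > 0 then
          (acc.1 + ((chars.count k : Int) - (tirage.count (String.singleton k) : Int)), String.singleton k)
        else acc) acc).2 = String.singleton k0 := by
  induction K with
  | nil => exact absurd hk0 (List.not_mem_nil)
  | cons k K ih =>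
    intro acc
    simp only [List.foldl_cons]
    have hz' : ∀ k ∈ K, k ≠ k0 → (pvMisses chars tirage).count k = 0 :=
      fun k hk => hz k (List.mem_cons_of_mem _ hk)
    by_cases hk : k = k0
    · subst hk
      have hc := pvMisses_count chars tirage k
      have h : ((chars.count k : Int) - (tirage.count (String.singleton k) : Int)) > 0 := by omega
      rw [if_pos h]
      exact pvFold_missing_keep chars tirage k K hz' _ rfl
    · have h0 := hz k (List.mem_cons_self ..) hk
      have hc := pvMisses_count chars tirage k
      rw [if_neg (by omega)]
      have hk0' : k0 ∈ K := by
        rcases List.mem_cons.mp hk0 with h | h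
        · exact absurd h.symm hk
        · exact h
      exact ih hk0' hz' acc

-- summing the multiplicities of m over a duplicate-free list of keys covering m gives m's length
theorem pv_sum_counts (m : List Char) (K : List Char) (hnd : K.Nodup)
    (hmem : ∀ k, 0 < m.count k → k ∈ K) :
    (K.map (fun k => (m.count k : Int))).sum = (m.length : Int) := by
  have h1 : (K.map (fun k => (m.count k : Int))).sum = ∑ a ∈ K.toFinset, (m.count a : Int) := by
    rw [List.sum_toFinset _ hnd]
  have hsub : m.toFinset ⊆ K.toFinset := by
    intro a ha
    simp only [List.mem_toFinset] at ha ⊢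
    exact hmem a (List.count_pos_iff.mpr ha)
  have h3 : ∑ a ∈ K.toFinset, (m.count a : Int) = ∑ a ∈ m.toFinset, (m.count a : Int) := by
    refine (Finset.sum_subset hsub ?_).symm
    intro x _ hx
    simp only [List.mem_toFinset] at hx
    simp [List.count_eq_zero.mpr hx]
  have h2 : ∑ a ∈ m.toFinset, m.count a = m.length := by
    simpa using Multiset.toFinset_sum_count_eq (m : Multiset Char)
  rw [h1, h3, ← h2]
  push_cast
  rfl

theorem mot_possible_joker_spec : Claim_equal_mot_possible_joker := by
  intro tirage mot _ _
  unfold Spec_mot_possible_joker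
  set chars := mot.toList with hchars
  set m := pvMisses chars tirage with hm
  have hcnt : ∀ k, m.count k = chars.count k - tirage.count (String.singleton k) :=
    fun k => pvMisses_count chars tirage k
  -- B's classification pass, rewritten as a fold over the distinct letters of `mot`
  set K := PySem.Set.ofList chars with hK
  have hR : pvClassify tirage mot =
      K.foldl (fun acc k =>
        if ((chars.count k : Int) - (tirage.count (String.singleton k) : Int)) > 0 then
          (acc.1 + ((chars.count k : Int) - (tirage.count (String.singleton k) : Int)), String.singleton k)
        else acc) (0, "") := by
    unfold pvClassify pvNeed pvHave
    rw [PySem.Dict.foldl_insert_getD_add_one_eq_counter, PySem.Dict.foldl_insert_getD_add_one_eq_counter,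
      PySem.Dict.items_counter, List.foldl_map]
    simp only [PySem.Dict.getD_counter]
    rfl
  have hA : mot_possible_joker tirage mot = pvAuxA chars tirage (tirage.contains "?") "" := rfl
  have hB : mot_possible_joker_alt tirage mot =
      (if (pvClassify tirage mot).1 = 0 then (true, "")
       else if (pvClassify tirage mot).1 = 1 ∧ tirage.contains "?" then (true, (pvClassify tirage mot).2)
       else (false, "")) := rfl
  -- the total shortfall is the number of misses of A's loop
  have htot : (pvClassify tirage mot).1 = (m.length : Int) := by
    rw [hR, pvFold_total, zero_add]
    refine pv_sum_counts m K (PySem.Set.nodup_ofList chars) ?_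
    intro k hk
    have hc := hcnt k
    have hkc : k ∈ chars := List.count_pos_iff.mp (by omega)
    rw [hK]
    exact (PySem.Set.mem_ofList _ _).mpr hkc
  rw [hA, hB]
  cases hja : tirage.contains "?" with
  | false =>
    rw [pvAuxA_false, ← hm]
    rcases hms : m with _ | ⟨l0, t⟩
    · simp only [hms, List.length_nil, Nat.cast_zero] at htot
      simp [htot]
    · have h0 : (pvClassify tirage mot).1 ≠ 0 := by
        rw [htot, hms]; push_cast [List.length_cons]; omega
      rw [if_neg (by simp [hms]), if_neg h0, if_neg (by simp)]
  | true =>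
    rw [pvAuxA_true, ← hm]
    rcases hms : m with _ | ⟨l0, t⟩
    · simp only [hms, List.length_nil, Nat.cast_zero] at htot
      simp [htot]
    · rcases t with _ | ⟨l1, t⟩
      · -- exactly one miss: B records exactly that letter
        have htot1 : (pvClassify tirage mot).1 = 1 := by rw [htot, hms]; norm_num
        have h1 : (pvClassify tirage mot).1 ≠ 0 := by rw [htot1]; omega
        have hpos : 0 < m.count l0 := by rw [hms]; simp
        have hz : ∀ k ∈ K, k ≠ l0 → m.count k = 0 := by
          intro k _ hk
          have hkl : ¬ l0 = k := fun hc => hk hc.symm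
          rw [hms]
          simp [hkl]
        have hk0 : l0 ∈ K := by
          have hc := hcnt l0
          have hkc : l0 ∈ chars := List.count_pos_iff.mp (by omega)
          rw [hK]
          exact (PySem.Set.mem_ofList _ _).mpr hkc
        have hmiss : (pvClassify tirage mot).2 = String.singleton l0 := by
          rw [hR]
          exact pvFold_missing chars tirage l0 K hk0 (by rw [← hm]; exact hpos)
            (by intro k hkK hkne; rw [← hm]; exact hz k hkK hkne) (0, "")
        rw [if_neg h1, if_pos ⟨htot1, rfl⟩, hmiss]
      · -- two or more misses
        have h2 : (2 : Int) ≤ (pvClassify tirage mot).1 := by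
          rw [htot, hms]; push_cast [List.length_cons]; omega
        rw [if_neg (by omega), if_neg (by rintro ⟨hx, -⟩; omega)]
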